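-- pv_equiv track=rewrite | github.com/sjhhh321/EGQR | hint/neo4j/HintNeo4j.py | __parse_clause_for_where
-- ===== SOURCE A (Python) =====
-- def __parse_clause_for_where(clause, query):
--     pos = query.find(f"{clause} ")
--     keywords = ["RETURN ", "OPTIONAL MATCH ", "WHERE ", "CONTAINS ", "WITHIN ",
--                 "UNION ", "ALL ", "UNWIND ", "AS ", "MERGE ", "ON ",
--                 "CREATE ", "SET ", "DETACH ", "DELETE ", "REMOVE ", "CALL ",
--                 "YIELD ", "DISTINCT ", "ORDER ", "BY ", "L_SKIP ", "LIMIT ",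
--                 "ASCENDING ", "ASC ", "DESCENDING ", "DESC ", "COUNT ", "CASE ", "ELSE ", "END ", "WHEN ", "THEN ",
--                 "ANY ", "NONE ", "SINGLE ", "EXISTS ", "MATCH "
--                 ]
--     res = []
--     while pos != -1:
--         f = lambda x: query.find(x, pos + 1) if query.find(x, pos + 1) > -1 else len(query)
--         next_pos = min(f(x) for x in keywords)
--         res.append((pos + len(f"{clause} "), next_pos))
--         pos = query.find(f"{clause} ", pos + 1)
--
--     return res
-- ===== SOURCE B (Python) =====
-- def __parse_clause_for_where(clause, query):
--     keywords = ["RETURN ", "OPTIONAL MATCH ", "WHERE ", "CONTAINS ", "WITHIN ",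
--                 "UNION ", "ALL ", "UNWIND ", "AS ", "MERGE ", "ON ",
--                 "CREATE ", "SET ", "DETACH ", "DELETE ", "REMOVE ", "CALL ",
--                 "YIELD ", "DISTINCT ", "ORDER ", "BY ", "L_SKIP ", "LIMIT ",
--                 "ASCENDING ", "ASC ", "DESCENDING ", "DESC ", "COUNT ", "CASE ", "ELSE ", "END ", "WHEN ", "THEN ",
--                 "ANY ", "NONE ", "SINGLE ", "EXISTS ", "MATCH "
--                 ]
--     n = len(query)
--     needle = clause + " "
--     # one pass: all positions where some keyword starts (sorted by construction)
--     kw_pos = [i for i in range(n) if any(query.startswith(k, i) for k in keywords)]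
--     res = []
--     j = 0  # pointer into kw_pos, advances monotonically with pos
--     for pos in range(n):
--         if query.startswith(needle, pos):
--             while j < len(kw_pos) and kw_pos[j] <= pos:
--                 j += 1
--             res.append((pos + len(needle), kw_pos[j] if j < len(kw_pos) else n))
--     return res
-- ===== Notes on version B (the rewrite author's own statement) =====
-- stated objective: alternative
-- what changed: Instead of rescanning the whole query for all 38 keywords at every clause occurrence (min of 38 find() calls per occurrence), B precomputes the sorted list of all keyword-start positions in one left-to-right pass and answers each clause occurrence with a single monotone pointer into that list; it trades C-level find() scans for one per-character pass.
import Mathlib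
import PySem

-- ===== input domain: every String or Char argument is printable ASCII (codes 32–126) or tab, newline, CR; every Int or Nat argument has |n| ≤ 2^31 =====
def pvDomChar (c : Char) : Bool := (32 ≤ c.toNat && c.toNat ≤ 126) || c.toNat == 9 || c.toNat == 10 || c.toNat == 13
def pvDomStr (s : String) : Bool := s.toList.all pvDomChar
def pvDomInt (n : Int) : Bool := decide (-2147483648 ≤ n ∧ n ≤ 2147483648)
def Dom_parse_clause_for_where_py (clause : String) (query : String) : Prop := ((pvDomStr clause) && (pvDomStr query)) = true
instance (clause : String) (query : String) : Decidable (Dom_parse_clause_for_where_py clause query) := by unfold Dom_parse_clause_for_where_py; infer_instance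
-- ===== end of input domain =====

-- B replaces A's per-occurrence rescans (a find over the whole query for each of the 38
-- keywords at every clause occurrence) by one precomputed sorted list of keyword-start
-- positions consumed left-to-right with a single monotone pointer (objective: alternative —
-- it removes A's repeated whole-query scans but trades them for a per-character pass).

-- ===== PORT A =====
-- the keyword literal shared by both Pythons
def pvKeywords : List (List Char) :=
  ["RETURN ".toList, "OPTIONAL MATCH ".toList, "WHERE ".toList, "CONTAINS ".toList, "WITHIN ".toList,
   "UNION ".toList, "ALL ".toList, "UNWIND ".toList, "AS ".toList, "MERGE ".toList, "ON ".toList,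
   "CREATE ".toList, "SET ".toList, "DETACH ".toList, "DELETE ".toList, "REMOVE ".toList, "CALL ".toList,
   "YIELD ".toList, "DISTINCT ".toList, "ORDER ".toList, "BY ".toList, "L_SKIP ".toList, "LIMIT ".toList,
   "ASCENDING ".toList, "ASC ".toList, "DESCENDING ".toList, "DESC ".toList, "COUNT ".toList, "CASE ".toList,
   "ELSE ".toList, "END ".toList, "WHEN ".toList, "THEN ".toList,
   "ANY ".toList, "NONE ".toList, "SINGLE ".toList, "EXISTS ".toList, "MATCH ".toList]

-- A's lambda f: query.find(x, pos + 1) if that is > -1 else len(query)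
def pvFDef (q x : List Char) (pos : Int) : Int :=
  if PySem.Chars.findFrom q x (pos + 1) > -1 then PySem.Chars.findFrom q x (pos + 1)
  else (q.length : Int)

-- A's while loop; fuel only makes it total (q.length + 1 iterations always suffice:
-- pos strictly increases inside [0, len), see the proof below)
def pvALoop (q needle : List Char) (pos : Int) : Nat → List (Int × Int)
  | 0 => []
  | fuel + 1 =>
    if pos = -1 then []
    else
      ((pos + (needle.length : Int),
        (PySem.List.min? (pvKeywords.map (fun x => pvFDef q x pos)) id).getD 0))
        :: pvALoop q needle (PySem.Chars.findFrom q needle (pos + 1)) fuel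

def parse_clause_for_where_py (clause : String) (query : String) : List (Int × Int) :=
  let q := query.toList
  let needle := clause.toList ++ [' ']
  pvALoop q needle (PySem.Chars.find q needle) (q.length + 1)

-- ===== PORT B =====
-- kw_pos = [i for i in range(n) if any(query.startswith(k, i) for k in keywords)]
def pvAnyKw (q : List Char) (i : Nat) : Bool :=
  pvKeywords.any (fun k => PySem.Chars.startswith (q.drop i) k)

def pvKwPos (q : List Char) : List Nat := (List.range q.length).filter (pvAnyKw q)

-- one step of B's loop over pos in range(n); the advancing pointer j is the
-- retained suffix st.1 of kw_pos (the while loop is the dropWhile)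
def pvBStep (q needle : List Char) (st : List Nat × List (Int × Int)) (pos : Nat) :
    List Nat × List (Int × Int) :=
  if PySem.Chars.startswith (q.drop pos) needle then
    let rem := st.1.dropWhile (fun x => x ≤ pos)
    (rem, st.2 ++ [((pos : Int) + (needle.length : Int),
                    match rem with | [] => (q.length : Int) | x :: _ => (x : Int))])
  else st

def parse_clause_for_where_py_alt (clause : String) (query : String) : List (Int × Int) :=
  let q := query.toList
  let needle := clause.toList ++ [' ']
  ((List.range q.length).foldl (pvBStep q needle) (pvKwPos q, [])).2

-- ===== PRECONDITION & SPEC =====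
def Spec_parse_clause_for_where_py (clause : String) (query : String) (out : List (Int × Int)) : Prop := out = parse_clause_for_where_py_alt clause query
instance (clause : String) (query : String) (out : List (Int × Int)) : Decidable (Spec_parse_clause_for_where_py clause query out) := by unfold Spec_parse_clause_for_where_py; infer_instance

-- ===== CLAIM (what is proved, stated in full; the proofs are below) =====
def Claim_equal_parse_clause_for_where_py : Prop := ∀ (clause : String) (query : String), Dom_parse_clause_for_where_py clause query → Spec_parse_clause_for_where_py clause query (parse_clause_for_where_py clause query)

-- ===== LEMMAS AND PROOFS =====

-- the common reference value: for each clause occurrence pos (in increasing order),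
-- the pair (pos + len(needle), first keyword-start position > pos, default len(query))
def pvEntry (q needle : List Char) (pos : Nat) : Int × Int :=
  ((pos : Int) + (needle.length : Int),
   match (pvKwPos q).dropWhile (fun x => x ≤ pos) with
   | [] => (q.length : Int)
   | x :: _ => (x : Int))

def pvRef (q needle : List Char) (s m : Nat) : List (Int × Int) :=
  ((List.range' s m).filter (fun i => PySem.Chars.startswith (q.drop i) needle)).map
    (pvEntry q needle)

-- findFrom = -1 means: no occurrence at any index ≥ s
lemma pvNoOcc (q sub : List Char) (s : Nat) (hs : s ≤ q.length)
    (h : PySem.Chars.findFrom q sub (s : Int) = -1) :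
    ∀ i, s ≤ i → ¬ sub <+: q.drop i := by
  intro i hi hpre
  rw [PySem.Chars.findFrom_natCast_eq_neg_one_iff q sub s hs] at h
  apply h
  rw [← PySem.Chars.isIn_iff_infix, ← PySem.Chars.exists_prefix_drop_iff_isIn]
  exact ⟨i - s, by rwa [List.drop_drop, Nat.add_sub_cancel' hi]⟩

-- findFrom ≠ -1 gives the first occurrence ≥ s
lemma pvOcc (q sub : List Char) (s : Nat) (hs : s ≤ q.length) (hsub : sub ≠ [])
    (h : PySem.Chars.findFrom q sub (s : Int) ≠ -1) :
    ∃ j : Nat, PySem.Chars.findFrom q sub (s : Int) = (j : Int) ∧ s ≤ j ∧ j < q.length ∧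
      sub <+: q.drop j ∧ ∀ i, s ≤ i → i < j → ¬ sub <+: q.drop i := by
  obtain ⟨h1, h2, h3⟩ := PySem.Chars.findFrom_natCast_spec q sub s hs h
  set F := PySem.Chars.findFrom q sub (s : Int) with hF
  have h0 : 0 ≤ F := le_trans (by exact_mod_cast Nat.zero_le s) h1
  refine ⟨F.toNat, by omega, by omega, ?_, h2, h3⟩
  by_contra hge
  rw [not_lt] at hge
  rw [List.drop_eq_nil_of_le hge, List.prefix_nil] at h2
  exact hsub h2

-- ordered head of dropWhile on a strictly increasing list
lemma pvDropWhile_char (l : List Nat) (hl : l.Pairwise (· < ·)) (pos : Nat) :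
    (∀ x t, l.dropWhile (fun a => a ≤ pos) = x :: t →
      x ∈ l ∧ pos < x ∧ ∀ y ∈ l, pos < y → x ≤ y) ∧
    (l.dropWhile (fun a => a ≤ pos) = [] → ∀ y ∈ l, y ≤ pos) := by
  induction l with
  | nil => simp
  | cons a l ih =>
    obtain ⟨ha, hl'⟩ := List.pairwise_cons.mp hl
    by_cases h : a ≤ pos
    · rw [List.dropWhile_cons, if_pos (by simpa using h)]
      obtain ⟨ih1, ih2⟩ := ih hl'
      constructor
      · intro x t hx
        obtain ⟨hmem, hgt, hmin⟩ := ih1 x t hx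
        exact ⟨List.mem_cons_of_mem _ hmem, hgt, fun y hy hposy => by
          rcases List.mem_cons.mp hy with rfl | hy'
          · omega
          · exact hmin y hy' hposy⟩
      · intro he y hy
        rcases List.mem_cons.mp hy with rfl | hy'
        · exact h
        · exact ih2 he y hy'
    · rw [List.dropWhile_cons, if_neg (by simpa using h)]
      constructor
      · intro x t hx
        injection hx with h1 h2
        subst h1; subst h2
        exact ⟨List.mem_cons_self, by omega, fun y hy _ => by
          rcases List.mem_cons.mp hy with rfl | hy'
          · omega
          · exact le_of_lt (ha y hy')⟩
      · intro he; simp at he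

lemma pvKwPos_pairwise (q : List Char) : (pvKwPos q).Pairwise (· < ·) :=
  List.Pairwise.sublist List.filter_sublist List.pairwise_lt_range

lemma pvKwPos_mem (q : List Char) (i : Nat) :
    i ∈ pvKwPos q ↔ i < q.length ∧ pvAnyKw q i = true := by
  simp [pvKwPos, List.mem_filter]

lemma pvKeywords_ne_nil : ∀ k ∈ pvKeywords, k ≠ [] := by decide

-- A's min over the 38 finds = B's first retained keyword position (default len)
lemma pvNext_eq (q : List Char) (pos : Nat) (hpos : pos < q.length) :
    (PySem.List.min? (pvKeywords.map (fun x => pvFDef q x (pos : Int))) id).getD 0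
      = (match (pvKwPos q).dropWhile (fun x => x ≤ pos) with
         | [] => (q.length : Int)
         | x :: _ => (x : Int)) := by
  have hcast : ((pos : Int) + 1) = ((pos + 1 : Nat) : Int) := by push_cast; ring
  have hs1 : pos + 1 ≤ q.length := hpos
  -- every fdef value: either len(query) or the first occurrence of that keyword > pos
  have hval : ∀ k ∈ pvKeywords, pvFDef q k (pos : Int) = (q.length : Int) ∨
      ∃ j : Nat, pvFDef q k (pos : Int) = (j : Int) ∧ pos < j ∧ j < q.length ∧
        k <+: q.drop j ∧ ∀ i, pos < i → i < j → ¬ k <+: q.drop i := by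
    intro k hk
    by_cases hF : PySem.Chars.findFrom q k ((pos : Int) + 1) = -1
    · left; simp [pvFDef, hF]
    · right
      rw [hcast] at hF
      obtain ⟨j, hj, hsj, hjlt, hpre, hmin⟩ := pvOcc q k (pos + 1) hs1 (pvKeywords_ne_nil k hk) hF
      refine ⟨j, ?_, by omega, hjlt, hpre, fun i hi1 hi2 => hmin i (by omega) hi2⟩
      simp only [pvFDef, hcast, hj]
      have : (0 : Int) ≤ (j : Int) := by exact_mod_cast Nat.zero_le j
      rw [if_pos (by omega)]
  -- min? is some
  obtain ⟨m, hm⟩ : ∃ m, PySem.List.min? (pvKeywords.map (fun x => pvFDef q x (pos : Int))) id = some m := by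
    cases h : PySem.List.min? (pvKeywords.map (fun x => pvFDef q x (pos : Int))) id
    · rw [PySem.List.min?_eq_none_iff] at h; simp [pvKeywords] at h
    · exact ⟨_, rfl⟩
  have hmmem := PySem.List.min?_mem hm
  have hmmin := PySem.List.min?_isMin hm
  rw [hm]
  obtain ⟨k0, hk0, hk0v⟩ := List.mem_map.mp hmmem
  cases hdw : (pvKwPos q).dropWhile (fun x => x ≤ pos) with
  | nil =>
    -- no keyword position > pos: every fdef is len(query)
    have hall := (pvDropWhile_char (pvKwPos q) (pvKwPos_pairwise q) pos).2 hdw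
    have : ∀ k ∈ pvKeywords, pvFDef q k (pos : Int) = (q.length : Int) := by
      intro k hk
      rcases hval k hk with h | ⟨j, hj, hj1, hj2, hpre, _⟩
      · exact h
      · exfalso
        have hjmem : j ∈ pvKwPos q := (pvKwPos_mem q j).mpr
          ⟨hj2, List.any_eq_true.mpr ⟨k, hk, (PySem.Chars.startswith_iff _ _).mpr hpre⟩⟩
        have := hall j hjmem; omega
    simp only [Option.getD_some]
    rw [← hk0v, this k0 hk0]
  | cons x t =>
    obtain ⟨hxmem, hxgt, hxmin⟩ :=
      (pvDropWhile_char (pvKwPos q) (pvKwPos_pairwise q) pos).1 x t hdw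
    obtain ⟨hxlt, hxany⟩ := (pvKwPos_mem q x).mp hxmem
    simp only [Option.getD_some]
    -- x ≤ m : every fdef value is ≥ x
    have hub : (x : Int) ≤ m := by
      rw [← hk0v]
      rcases hval k0 hk0 with h | ⟨j, hj, hj1, hj2, hpre, _⟩
      · rw [h]; exact_mod_cast le_of_lt hxlt
      · rw [hj]
        have hjmem : j ∈ pvKwPos q := (pvKwPos_mem q j).mpr
          ⟨hj2, List.any_eq_true.mpr ⟨k0, hk0, (PySem.Chars.startswith_iff _ _).mpr hpre⟩⟩
        exact_mod_cast hxmin j hjmem hj1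
    -- m ≤ x : the keyword occurring at x has its first occurrence > pos at some j ≤ x
    have hlb : m ≤ (x : Int) := by
      obtain ⟨kx, hkx, hkxsw⟩ := List.any_eq_true.mp hxany
      have hpre : kx <+: q.drop x := (PySem.Chars.startswith_iff _ _).mp hkxsw
      have hFne : PySem.Chars.findFrom q kx ((pos + 1 : Nat) : Int) ≠ -1 := by
        intro hF
        exact pvNoOcc q kx (pos + 1) hs1 hF x (by omega) hpre
      obtain ⟨j, hj, hsj, _, _, hmin⟩ := pvOcc q kx (pos + 1) hs1 (pvKeywords_ne_nil kx hkx) hFne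
      have hjx : j ≤ x := by
        by_contra hgt
        exact hmin x (by omega) (by omega) hpre
      have hfv : pvFDef q kx (pos : Int) = (j : Int) := by
        simp only [pvFDef, hcast, hj]
        have : (0 : Int) ≤ (j : Int) := by exact_mod_cast Nat.zero_le j
        rw [if_pos (by omega)]
      have := hmmin _ (List.mem_map.mpr ⟨kx, hkx, hfv⟩)
      simp only [id] at this
      omega
    omega

-- dropping an already-consumed prefix whose elements are all ≤ pos changes nothing
lemma pvDropWhile_append (done rem : List Nat) (pos : Nat) (h : ∀ y ∈ done, y ≤ pos) :
    (done ++ rem).dropWhile (fun x => x ≤ pos) = rem.dropWhile (fun x => x ≤ pos) := by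
  induction done with
  | nil => rfl
  | cons a d ih =>
    rw [List.cons_append, List.dropWhile_cons, if_pos (by simpa using h a List.mem_cons_self)]
    exact ih fun y hy => h y (List.mem_cons_of_mem _ hy)

-- B's fold computes the reference list
lemma pvB_fold (q needle : List Char) :
    ∀ (m s : Nat) (rem : List Nat) (res : List (Int × Int)),
    (∃ done, pvKwPos q = done ++ rem ∧ ∀ y ∈ done, y < s) →
    ((List.range' s m).foldl (pvBStep q needle) (rem, res)).2 = res ++ pvRef q needle s m := by
  intro m
  induction m with
  | zero => intro s rem res _; simp [pvRef]
  | succ m ih =>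
    intro s rem res ⟨done, hsplit, hdone⟩
    rw [List.range'_succ, List.foldl_cons]
    by_cases hp : PySem.Chars.startswith (q.drop s) needle
    · have hrem : rem.dropWhile (fun x => x ≤ s) = (pvKwPos q).dropWhile (fun x => x ≤ s) := by
        rw [hsplit, pvDropWhile_append done rem s fun y hy => le_of_lt (hdone y hy)]
      have hstep : pvBStep q needle (rem, res) s =
          (rem.dropWhile (fun x => x ≤ s), res ++ [pvEntry q needle s]) := by
        simp only [pvBStep, if_pos hp, pvEntry, hrem]
      rw [hstep, ih (s + 1) _ _ ?_]
      · rw [pvRef, pvRef, List.range'_succ, List.filter_cons, if_pos (by simpa using hp)]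
        simp
      · refine ⟨done ++ rem.takeWhile (fun x => x ≤ s), by
          rw [hsplit, List.append_assoc, List.takeWhile_append_dropWhile], ?_⟩
        intro y hy
        rcases List.mem_append.mp hy with hy' | hy'
        · exact lt_trans (hdone y hy') (by omega)
        · have := List.mem_takeWhile_imp hy'
          simp at this; omega
    · have hstep : pvBStep q needle (rem, res) s = (rem, res) := by
        simp only [pvBStep, if_neg hp]
      rw [hstep, ih (s + 1) _ _ ⟨done, hsplit, fun y hy => lt_trans (hdone y hy) (by omega)⟩]
      rw [pvRef, pvRef, List.range'_succ, List.filter_cons, if_neg (by simpa using hp)]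

-- A's loop computes the reference list
lemma pvA_loop (q needle : List Char) (hne : needle ≠ []) :
    ∀ (fuel s : Nat), s ≤ q.length → q.length + 1 - s ≤ fuel →
    pvALoop q needle (PySem.Chars.findFrom q needle (s : Int)) fuel = pvRef q needle s (q.length - s) := by
  intro fuel
  induction fuel with
  | zero => intro s hs hf; omega
  | succ fuel ih =>
    intro s hs hf
    by_cases hF : PySem.Chars.findFrom q needle (s : Int) = -1
    · rw [hF]
      have : ((List.range' s (q.length - s)).filter
          (fun i => PySem.Chars.startswith (q.drop i) needle)) = [] := by
        rw [List.filter_eq_nil_iff]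
        intro i hi
        have hi' := List.mem_range'_1.mp hi
        intro hsw
        exact pvNoOcc q needle s hs hF i hi'.1 ((PySem.Chars.startswith_iff _ _).mp hsw)
      simp [pvALoop, pvRef, this]
    · obtain ⟨j, hj, hsj, hjlt, hpre, hmin⟩ := pvOcc q needle s hs hne hF
      rw [hj]
      have hjne : (j : Int) ≠ -1 := by omega
      simp only [pvALoop, if_neg hjne]
      have hnext := pvNext_eq q j hjlt
      have hrec : (j : Int) + 1 = ((j + 1 : Nat) : Int) := by push_cast; ring
      rw [hrec, ih (j + 1) (by omega) (by omega)]
      -- decompose the reference list at j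
      have hsplit : List.range' s (q.length - s) =
          List.range' s (j - s) ++ List.range' j (q.length - j) := by
        have := @List.range'_append s (j - s) (q.length - j) 1
        simp only [one_mul] at this
        rw [show s + (j - s) = j by omega,
          show (j - s) + (q.length - j) = q.length - s by omega] at this
        exact this.symm
      have hfilter1 : (List.range' s (j - s)).filter
          (fun i => PySem.Chars.startswith (q.drop i) needle) = [] := by
        rw [List.filter_eq_nil_iff]
        intro i hi
        have hi' := List.mem_range'_1.mp hi
        intro hsw
        exact hmin i hi'.1 (by omega) ((PySem.Chars.startswith_iff _ _).mp hsw)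
      have hhead : List.range' j (q.length - j) = j :: List.range' (j + 1) (q.length - (j + 1)) := by
        rw [show q.length - j = (q.length - (j + 1)) + 1 by omega, List.range'_succ]
      have hRHS : pvRef q needle s (q.length - s)
          = pvEntry q needle j :: pvRef q needle (j + 1) (q.length - (j + 1)) := by
        simp only [pvRef]
        rw [hsplit, List.filter_append, hfilter1, List.nil_append, hhead, List.filter_cons,
          if_pos (by simpa using (PySem.Chars.startswith_iff (q.drop j) needle).mpr hpre),
          List.map_cons]
      rw [hRHS]
      congr 1
      simp only [pvEntry, hnext]

-- ===== VERDICT (by name: the statement is the Claim_ definition above) =====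
theorem parse_clause_for_where_py_spec : Claim_equal_parse_clause_for_where_py := by
  intro clause query _
  unfold Spec_parse_clause_for_where_py parse_clause_for_where_py parse_clause_for_where_py_alt
  show pvALoop query.toList (clause.toList ++ [' '])
      (PySem.Chars.find query.toList (clause.toList ++ [' '])) (query.toList.length + 1)
    = (List.foldl (pvBStep query.toList (clause.toList ++ [' ']))
        (pvKwPos query.toList, []) (List.range query.toList.length)).2
  have hne : clause.toList ++ [' '] ≠ [] := by simp
  have hA : PySem.Chars.find query.toList (clause.toList ++ [' '])
      = PySem.Chars.findFrom query.toList (clause.toList ++ [' ']) ((0 : Nat) : Int) := by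
    rw [show (((0 : Nat) : Int)) = (0 : Int) by rfl, PySem.Chars.findFrom_zero]
  rw [hA, pvA_loop query.toList (clause.toList ++ [' ']) hne (query.toList.length + 1) 0
    (Nat.zero_le _) (by omega)]
  rw [List.range_eq_range',
    pvB_fold query.toList (clause.toList ++ [' ']) query.toList.length 0 (pvKwPos query.toList) []
      ⟨[], rfl, by simp⟩]
  simp [pvRef]
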